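-- pv_equiv track=rewrite | github.com/sodlfmag/Dev-Course-Algorithm | 프로그래머스/2/121688. [PCCP 모의고사 2] 2번 - 신입사원 교육/[PCCP 모의고사 2] 2번 - 신입사원 교육.py | solution
-- ===== SOURCE A (Python) =====
-- from heapq import heapify, heappush, heappop
--
-- def solution(ability, number):
--     heapify(ability)
--     for _ in range(number):
--         min1 = heappop(ability)
--         min2 = heappop(ability)
--         heappush(ability, min1 + min2)
--         heappush(ability, min1 + min2)
--     return sum(ability)
-- ===== SOURCE B (Python) =====
-- def _insert(pool, v):
--     # insert v into the sorted list pool, keeping it sorted (linear scan)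
--     for i, x in enumerate(pool):
--         if v <= x:
--             return pool[:i] + [v] + pool[i:]
--     return pool + [v]
--
--
-- def solution(ability, number):
--     # Sorted-pool formulation: the two smallest are always the first two
--     # elements; the doubled sum is re-inserted at its sorted position.
--     # (Unlike A, this does not mutate `ability`; return value is identical.)
--     pool = sorted(ability)
--     for _ in range(number):
--         m1, m2 = pool[0], pool[1]
--         s = m1 + m2
--         pool = _insert(_insert(pool[2:], s), s)
--     return sum(pool)
-- ===== Notes on version B (the rewrite author's own statement) =====
-- stated objective: alternative
-- what changed: Replaces the binary heap with a sorted pool: sort once, take the two front elements each round and re-insert their sum (twice) at its sorted position; B also does not mutate the input list, while A heapifies it in place (return value is identical).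
import Mathlib
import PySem

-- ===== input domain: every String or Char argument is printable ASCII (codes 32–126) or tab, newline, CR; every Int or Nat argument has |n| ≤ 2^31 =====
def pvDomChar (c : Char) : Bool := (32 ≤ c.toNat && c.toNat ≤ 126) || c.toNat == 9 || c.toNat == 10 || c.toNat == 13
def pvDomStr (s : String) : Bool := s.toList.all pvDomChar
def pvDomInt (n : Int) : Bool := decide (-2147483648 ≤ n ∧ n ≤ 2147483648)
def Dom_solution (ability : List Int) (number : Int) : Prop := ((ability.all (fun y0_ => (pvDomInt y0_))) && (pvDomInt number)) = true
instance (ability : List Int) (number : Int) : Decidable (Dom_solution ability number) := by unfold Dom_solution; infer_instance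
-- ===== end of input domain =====

-- B keeps the merge pool as a sorted list instead of A's binary heap (alternative decomposition,
-- same return value); note A mutates `ability` in place (heapify) while B does not — the
-- equivalence proved here is about the RETURN value only.

-- ===== PORT A =====
-- heapq's heapify/heappop/heappush are ported by their documented contract (the heap is a pool of
-- elements; heappop removes and returns the minimum, heappush adds an element, heapify only
-- reorders in place): exact for this function, whose observable result sum(ability) does not
-- depend on the heap's internal array order. heappop on an empty heap raises IndexError → none.
def pyHeappop? (h : List Int) : Option (Int × List Int) :=
  match PySem.List.min? h (fun x => x) with
  | none => none
  | some m =>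
    match PySem.List.remove? h m with
    | none => none
    | some h' => some (m, h')

-- 'for _ in range(number)' over the heap; none = an IndexError escaped the loop
def solutionGo : Nat → List Int → Option (List Int)
  | 0, h => some h
  | Nat.succ k, h =>
    match pyHeappop? h with
    | none => none
    | some (m1, h1) =>
      match pyHeappop? h1 with
      | none => none
      | some (m2, h2) => solutionGo k ((h2 ++ [m1 + m2]) ++ [m1 + m2])

def solution (ability : List Int) (number : Int) : Int :=
  match solutionGo number.toNat ability with
  | some h => h.sum
  | none => 0   -- Python raises here; excluded by Pre_solution

-- ===== PORT B =====
-- _insert from Source B: insert v into a sorted list before the first element ≥ v (linear scan)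
def insertSorted : List Int → Int → List Int
  | [], v => [v]
  | x :: xs, v => if v ≤ x then v :: x :: xs else x :: insertSorted xs v

-- Source B's loop over the sorted pool; none = an IndexError (pool shorter than 2)
def solutionAltGo : Nat → List Int → Option (List Int)
  | 0, p => some p
  | Nat.succ k, p =>
    match p with
    | m1 :: m2 :: rest => solutionAltGo k (insertSorted (insertSorted rest (m1 + m2)) (m1 + m2))
    | _ => none

def solution_alt (ability : List Int) (number : Int) : Int :=
  match solutionAltGo number.toNat (PySem.List.sorted ability (fun x => x)) with
  | some p => p.sum
  | none => 0   -- Python raises here; excluded by Pre_solution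

-- ===== PRECONDITION & SPEC =====
-- Pre_ excludes exactly the inputs where Python A raises IndexError: a heappop with number ≥ 1
-- needs at least two elements (the pool's size never changes across a round).
def Pre_solution (ability : List Int) (number : Int) : Prop :=
  1 ≤ number → 2 ≤ ability.length
instance (ability : List Int) (number : Int) : Decidable (Pre_solution ability number) := by
  unfold Pre_solution; infer_instance

def pvWitness_solution : List Int × Int := ([2, 5, 3], 2)

def Spec_solution (ability : List Int) (number : Int) (out : Int) : Prop := out = solution_alt ability number
instance (ability : List Int) (number : Int) (out : Int) : Decidable (Spec_solution ability number out) := by unfold Spec_solution; infer_instance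

-- ===== CLAIM (what is proved, stated in full; the proofs are below) =====
def Claim_equal_solution : Prop := ∀ (ability : List Int) (number : Int), Dom_solution ability number → Pre_solution ability number → Spec_solution ability number (solution ability number)

-- ===== LEMMAS AND PROOFS =====

theorem insertSorted_perm (xs : List Int) (v : Int) : (insertSorted xs v).Perm (v :: xs) := by
  induction xs with
  | nil => simp [insertSorted]
  | cons x xs ih =>
    simp only [insertSorted]
    split
    · exact List.Perm.refl _
    · exact (List.Perm.cons x ih).trans (List.Perm.swap v x xs)

theorem insertSorted_pairwise (xs : List Int) (v : Int) (h : xs.Pairwise (· ≤ ·)) :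
    (insertSorted xs v).Pairwise (· ≤ ·) := by
  induction xs with
  | nil => simp [insertSorted]
  | cons x xs ih =>
    rw [List.pairwise_cons] at h
    simp only [insertSorted]
    split
    · rename_i hvx
      refine List.pairwise_cons.2 ⟨?_, List.pairwise_cons.2 ⟨h.1, h.2⟩⟩
      intro y hy
      rcases List.mem_cons.1 hy with rfl | hy
      · exact hvx
      · exact le_trans hvx (h.1 y hy)
    · rename_i hvx
      refine List.pairwise_cons.2 ⟨?_, ih h.2⟩
      intro y hy
      have := (insertSorted_perm xs v).mem_iff.1 hy
      rcases List.mem_cons.1 this with rfl | hy'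
      · omega
      · exact h.1 y hy'

-- A pops the minimum value of the pool; on a sorted pool that is the head.
theorem pyHeappop?_of_perm_sorted (h : List Int) (m : Int) (t : List Int)
    (hp : h.Perm (m :: t)) (hs : (m :: t).Pairwise (· ≤ ·)) :
    ∃ h', pyHeappop? h = some (m, h') ∧ h'.Perm t := by
  have hmem : m ∈ h := hp.mem_iff.2 (List.mem_cons_self)
  have hne : h ≠ [] := by intro hnil; subst hnil; simp at hmem
  obtain ⟨m', hm'⟩ : ∃ m', PySem.List.min? h (fun x => x) = some m' := by
    cases hmin : PySem.List.min? h (fun x => x) with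
    | none => exact absurd ((PySem.List.min?_eq_none_iff h _).1 hmin) hne
    | some m' => exact ⟨m', rfl⟩
  have hm'mem : m' ∈ h := PySem.List.min?_mem hm'
  have h1 : m' ≤ m := PySem.List.min?_isMin hm' m hmem
  have h2 : m ≤ m' := by
    have hm'p : m' ∈ m :: t := hp.mem_iff.1 hm'mem
    rcases List.mem_cons.1 hm'p with rfl | hmt
    · exact le_refl _
    · exact (List.pairwise_cons.1 hs).1 m' hmt
  have hmm : m' = m := le_antisymm h1 h2
  subst hmm
  refine ⟨h.erase m', ?_, ?_⟩
  · simp only [pyHeappop?]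
    split
    · rename_i hnone; rw [hm'] at hnone; exact absurd hnone (by simp)
    · rename_i m'' hsome
      rw [hm'] at hsome
      cases hsome
      rw [PySem.List.remove?_eq_some_erase h m' hm'mem]
  · have := hp.erase m'
    simpa [List.erase_cons_head] using this

-- Main invariant: if the heap pool and the sorted pool are permutations and the sorted
-- pool is sorted, the two loops produce related results (both fail, or permutable pools).
theorem go_rel (k : Nat) : ∀ (h p : List Int), h.Perm p → p.Pairwise (· ≤ ·) →
    Option.Rel List.Perm (solutionGo k h) (solutionAltGo k p) := by
  induction k with
  | zero => intro h p hp _; exact Option.Rel.some hp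
  | succ k ih =>
    intro h p hp hs
    match p with
    | [] =>
      have : h = [] := List.perm_nil.1 hp
      subst this
      have h0 : pyHeappop? [] = none := by decide
      simp only [solutionGo, solutionAltGo, h0]
      exact Option.Rel.none
    | [x] =>
      have : h = [x] := List.perm_singleton.1 hp
      subst this
      have h1 : pyHeappop? [x] = some (x, []) := by
        simp [pyHeappop?, PySem.List.min?, PySem.List.remove?]
      have h0 : pyHeappop? [] = none := by decide
      simp only [solutionGo, solutionAltGo, h1, h0]
      exact Option.Rel.none
    | m1 :: m2 :: rest =>
      obtain ⟨h1, e1, hp1⟩ := pyHeappop?_of_perm_sorted h m1 (m2 :: rest) hp hs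
      have hs' : (m2 :: rest).Pairwise (· ≤ ·) := (List.pairwise_cons.1 hs).2
      obtain ⟨h2, e2, hp2⟩ := pyHeappop?_of_perm_sorted h1 m2 rest hp1 hs'
      simp only [solutionGo, solutionAltGo, e1, e2]
      apply ih
      · -- (h2 ++ [s]) ++ [s] ~ insertSorted (insertSorted rest s) s
        set s := m1 + m2 with hsdef
        have b1 : (insertSorted (insertSorted rest s) s).Perm (s :: s :: rest) :=
          (insertSorted_perm _ s).trans (List.Perm.cons s (insertSorted_perm rest s))
        have a1 : ((h2 ++ [s]) ++ [s]).Perm (s :: s :: h2) :=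
          (List.perm_append_singleton s (h2 ++ [s])).trans
            (List.Perm.cons s (List.perm_append_singleton s h2))
        exact a1.trans ((List.Perm.cons s (List.Perm.cons s hp2)).trans b1.symm)
      · exact insertSorted_pairwise _ _ (insertSorted_pairwise _ _ (List.pairwise_cons.1 hs').2)

-- ===== VERDICT (by name: the statement is the Claim_ definition above) =====
theorem solution_spec : Claim_equal_solution := by
  intro ability number _ _
  unfold Spec_solution solution solution_alt
  have hperm : ability.Perm (PySem.List.sorted ability (fun x => x)) :=
    (PySem.List.sorted_perm ability (fun x => x) false).symm
  have hpair := PySem.List.sorted_pairwise ability (fun x => x)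
  have hrel := go_rel number.toNat ability (PySem.List.sorted ability (fun x => x)) hperm hpair
  generalize hA : solutionGo number.toNat ability = oA at hrel
  generalize hB : solutionAltGo number.toNat (PySem.List.sorted ability (fun x => x)) = oB at hrel
  cases hrel with
  | none => simp
  | some hperm2 => simpa using hperm2.sum_eq
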